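-- pv_equiv track=rewrite | github.com/Nghia03092004/nghia03092004.github.io | project_euler_unified/problem_840/solution.py | sum_esp_product
-- ===== SOURCE A (Python) =====
-- def sum_esp_product(xs, mod=None):
--     """sum_{k=1}^{n} e_k = prod(1 + x_i) - 1."""
--     result = 1
--     for x in xs:
--         if mod:
--             result = result * ((1 + x) % mod) % mod
--         else:
--             result *= (1 + x)
--     return (result - 1) % mod if mod else result - 1
-- ===== SOURCE B (Python) =====
-- def sum_esp_product(xs, mod=None):
--     """sum_{k=1}^{n} e_k = prod(1 + x_i) - 1, via divide-and-conquer product."""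
--     def prod_dc(seg):
--         if not seg:
--             return 1
--         if len(seg) == 1:
--             v = 1 + seg[0]
--             return v % mod if mod else v
--         h = len(seg) // 2
--         v = prod_dc(seg[:h]) * prod_dc(seg[h:])
--         return v % mod if mod else v
--     p = prod_dc(xs)
--     return (p - 1) % mod if mod else p - 1
-- ===== Notes on version B (the rewrite author's own statement) =====
-- stated objective: alternative
-- what changed: Replaced the single left-to-right accumulator loop with a recursive divide-and-conquer product over list halves (reducing each partial product mod m when mod is truthy), with the -1 and final reduction applied once at the top.
import Mathlib
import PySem

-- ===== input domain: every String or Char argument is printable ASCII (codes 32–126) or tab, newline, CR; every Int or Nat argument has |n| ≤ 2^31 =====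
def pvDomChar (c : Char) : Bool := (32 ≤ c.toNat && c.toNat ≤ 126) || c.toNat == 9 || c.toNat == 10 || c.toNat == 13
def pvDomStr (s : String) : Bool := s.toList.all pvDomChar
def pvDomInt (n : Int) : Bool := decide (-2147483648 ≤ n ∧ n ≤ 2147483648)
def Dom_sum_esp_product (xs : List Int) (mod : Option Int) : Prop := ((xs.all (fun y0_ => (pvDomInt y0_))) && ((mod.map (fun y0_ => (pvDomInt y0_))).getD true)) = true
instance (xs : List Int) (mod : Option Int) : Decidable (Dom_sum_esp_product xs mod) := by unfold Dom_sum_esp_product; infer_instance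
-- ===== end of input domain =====

-- B replaces A's left-to-right accumulator loop by a recursive divide-and-conquer
-- product over list halves (same cost, different decomposition).


-- ===== PORT A =====
def sum_esp_product (xs : List Int) (mod : Option Int) : Int :=
  let result := xs.foldl (fun result x =>
    match mod with
    | some m =>
      if m ≠ 0 then PySem.Int.mod (result * PySem.Int.mod (1 + x) m) m
      else result * (1 + x)
    | none => result * (1 + x)) 1
  match mod with
  | some m => if m ≠ 0 then PySem.Int.mod (result - 1) m else result - 1
  | none => result - 1

-- ===== PORT B =====
-- `v % mod if mod else v`
def pvRed (mod : Option Int) (v : Int) : Int :=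
  match mod with
  | some m => if m ≠ 0 then PySem.Int.mod v m else v
  | none => v

def pvProdDC (mod : Option Int) (seg : List Int) : Int :=
  match seg with
  | [] => 1
  | [x] => pvRed mod (1 + x)
  | x :: y :: t =>
    let h := (x :: y :: t).length / 2
    pvRed mod (pvProdDC mod ((x :: y :: t).take h) * pvProdDC mod ((x :: y :: t).drop h))
termination_by seg.length
decreasing_by
  all_goals simp [List.length_take, List.length_drop]; omega

def sum_esp_product_alt (xs : List Int) (mod : Option Int) : Int :=
  pvRed mod (pvProdDC mod xs - 1)

-- ===== PRECONDITION & SPEC =====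
def Spec_sum_esp_product (xs : List Int) (mod : Option Int) (out : Int) : Prop := out = sum_esp_product_alt xs mod
instance (xs : List Int) (mod : Option Int) (out : Int) : Decidable (Spec_sum_esp_product xs mod out) := by unfold Spec_sum_esp_product; infer_instance

-- ===== CLAIM (what is proved, stated in full; the proofs are below) =====
def Claim_equal_sum_esp_product : Prop := ∀ (xs : List Int) (mod : Option Int), Dom_sum_esp_product xs mod → Spec_sum_esp_product xs mod (sum_esp_product xs mod)

-- ===== LEMMAS AND PROOFS =====

/-- product of (1 + x) over the list -/
def pvP (xs : List Int) : Int := (xs.map (fun x => 1 + x)).prod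

theorem dvd_mod_sub (m a : Int) : m ∣ PySem.Int.mod a m - a := by
  refine ⟨-(PySem.Int.floordiv a m), ?_⟩
  have := PySem.Int.floordiv_mul_add_mod a m
  linarith

theorem fmod_congr {m x y : Int} (h : m ∣ x - y) : PySem.Int.mod x m = PySem.Int.mod y m := by
  rcases lt_trichotomy m 0 with hm | hm | hm
  · have hx : PySem.Int.mod x m = -PySem.Int.mod (-x) (-m) := by
      have := PySem.Int.mod_neg_neg (-x) (-m); simp only [neg_neg] at this; exact this
    have hy : PySem.Int.mod y m = -PySem.Int.mod (-y) (-m) := by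
      have := PySem.Int.mod_neg_neg (-y) (-m); simp only [neg_neg] at this; exact this
    rw [hx, hy]
    have hpos : (0:Int) < -m := by omega
    rw [PySem.Int.mod_eq_emod_of_pos hpos, PySem.Int.mod_eq_emod_of_pos hpos]
    obtain ⟨k, hk⟩ := h
    have hdvd : (-m) ∣ (-x) - (-y) := ⟨k, by linarith⟩
    rw [Int.emod_eq_emod_iff_emod_sub_eq_zero.mpr (Int.emod_eq_zero_of_dvd hdvd)]
  · subst hm
    have : x = y := by
      have := zero_dvd_iff.mp h; omega
    simp [this]
  · rw [PySem.Int.mod_eq_emod_of_pos hm, PySem.Int.mod_eq_emod_of_pos hm]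
    exact Int.emod_eq_emod_iff_emod_sub_eq_zero.mpr (Int.emod_eq_zero_of_dvd h)

-- A's loop, mod case
theorem pvP_cons (x : Int) (t : List Int) : pvP (x :: t) = (1 + x) * pvP t := by
  simp [pvP]

theorem pvP_append (a b : List Int) : pvP (a ++ b) = pvP a * pvP b := by
  simp [pvP]

theorem foldA (m : Int) (hm : m ≠ 0) :
    ∀ (xs : List Int) (c : Int), xs ≠ [] →
      xs.foldl (fun r x => PySem.Int.mod (r * PySem.Int.mod (1 + x) m) m) c
        = PySem.Int.mod (c * pvP xs) m := by
  intro xs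
  induction xs with
  | nil => intro c h; exact absurd rfl h
  | cons x t ih =>
    intro c _
    cases t with
    | nil =>
      show PySem.Int.mod (c * PySem.Int.mod (1 + x) m) m = PySem.Int.mod (c * pvP [x]) m
      have hp : pvP [x] = 1 + x := by simp [pvP]
      rw [hp]
      apply fmod_congr
      obtain ⟨k, hk⟩ := dvd_mod_sub m (1 + x)
      refine ⟨c * k, ?_⟩
      have f : PySem.Int.mod (1 + x) m = (1 + x) + m * k := by linarith
      rw [f]; ring
    | cons y s =>
      rw [List.foldl_cons, ih _ (by simp)]
      apply fmod_congr
      obtain ⟨k1, e1⟩ := dvd_mod_sub m (c * PySem.Int.mod (1 + x) m)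
      obtain ⟨k2, e2⟩ := dvd_mod_sub m (1 + x)
      refine ⟨k1 * pvP (y :: s) + c * k2 * pvP (y :: s), ?_⟩
      have f1 : PySem.Int.mod (c * PySem.Int.mod (1 + x) m) m
          = c * PySem.Int.mod (1 + x) m + m * k1 := by linarith
      have f2 : PySem.Int.mod (1 + x) m = (1 + x) + m * k2 := by linarith
      rw [pvP_cons x (y :: s), f1, f2]; ring

theorem foldA_plain : ∀ (xs : List Int) (c : Int),
    xs.foldl (fun r x => r * (1 + x)) c = c * pvP xs := by
  intro xs
  induction xs with
  | nil => intro c; simp [pvP]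
  | cons x t ih =>
    intro c
    rw [List.foldl_cons, ih, pvP_cons]
    ring

theorem take_half_ne_nil (x y : Int) (t : List Int) :
    (x :: y :: t).take ((x :: y :: t).length / 2) ≠ [] := by
  apply List.ne_nil_of_length_pos
  simp [List.length_take]

theorem drop_half_ne_nil (x y : Int) (t : List Int) :
    (x :: y :: t).drop ((x :: y :: t).length / 2) ≠ [] := by
  apply List.ne_nil_of_length_pos
  simp [List.length_drop]; omega

theorem prodDC_some (m : Int) (hm : m ≠ 0) :
    ∀ (n : Nat) (xs : List Int), xs.length ≤ n → xs ≠ [] →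
      pvProdDC (some m) xs = PySem.Int.mod (pvP xs) m := by
  intro n
  induction n with
  | zero => intro xs hlen hne; cases xs with
    | nil => exact absurd rfl hne
    | cons a b => simp at hlen
  | succ n ih =>
    intro xs hlen hne
    match xs with
    | [x] =>
      simp [pvProdDC, pvRed, hm, pvP]
    | x :: y :: t =>
      rw [pvProdDC]
      have hlen2 : (x :: y :: t).length = t.length + 2 := by simp
      have h1 : ((x :: y :: t).take ((x :: y :: t).length / 2)).length ≤ n := by
        simp only [List.length_take, hlen2]
        simp [hlen2] at hlen; omega
      have h2 : ((x :: y :: t).drop ((x :: y :: t).length / 2)).length ≤ n := by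
        simp only [List.length_drop, hlen2]
        simp [hlen2] at hlen; omega
      rw [ih _ h1 (take_half_ne_nil x y t), ih _ h2 (drop_half_ne_nil x y t)]
      simp only [pvRed, hm, ne_eq, not_false_eq_true, if_true]
      have hsplit : pvP (x :: y :: t)
          = pvP ((x :: y :: t).take ((x :: y :: t).length / 2))
            * pvP ((x :: y :: t).drop ((x :: y :: t).length / 2)) := by
        conv_lhs => rw [← List.take_append_drop ((x :: y :: t).length / 2) (x :: y :: t)]
        rw [pvP_append]
      rw [hsplit]
      apply fmod_congr
      set A := pvP ((x :: y :: t).take ((x :: y :: t).length / 2)) with hA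
      set B := pvP ((x :: y :: t).drop ((x :: y :: t).length / 2)) with hB
      obtain ⟨k1, e1⟩ := dvd_mod_sub m A
      obtain ⟨k2, e2⟩ := dvd_mod_sub m B
      refine ⟨k1 * PySem.Int.mod B m + A * k2, ?_⟩
      have f1 : PySem.Int.mod A m = A + m * k1 := by linarith
      have f2 : PySem.Int.mod B m = B + m * k2 := by linarith
      rw [f1, f2]; ring

theorem prodDC_plain (mod : Option Int) (hid : ∀ v, pvRed mod v = v) :
    ∀ (n : Nat) (xs : List Int), xs.length ≤ n →
      pvProdDC mod xs = pvP xs := by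
  intro n
  induction n with
  | zero => intro xs hlen; cases xs with
    | nil => simp [pvProdDC, pvP]
    | cons a b => simp at hlen
  | succ n ih =>
    intro xs hlen
    match xs with
    | [] => simp [pvProdDC, pvP]
    | [x] => rw [pvProdDC, hid]; simp [pvP]
    | x :: y :: t =>
      rw [pvProdDC, hid]
      have hlen2 : (x :: y :: t).length = t.length + 2 := by simp
      have h1 : ((x :: y :: t).take ((x :: y :: t).length / 2)).length ≤ n := by
        simp only [List.length_take, hlen2]; simp [hlen2] at hlen; omega
      have h2 : ((x :: y :: t).drop ((x :: y :: t).length / 2)).length ≤ n := by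
        simp only [List.length_drop, hlen2]; simp [hlen2] at hlen; omega
      rw [ih _ h1, ih _ h2]
      conv_rhs => rw [← List.take_append_drop ((x :: y :: t).length / 2) (x :: y :: t)]
      rw [pvP_append]

-- ===== VERDICT (by name: the statement is the Claim_ definition above) =====
theorem sum_esp_product_spec : Claim_equal_sum_esp_product := by
  intro xs mod _
  unfold Spec_sum_esp_product sum_esp_product sum_esp_product_alt
  cases mod with
  | none =>
    simp only [pvRed]
    rw [foldA_plain, prodDC_plain none (fun v => rfl) xs.length xs le_rfl, one_mul]
  | some m =>
    by_cases hm : m = 0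
    · subst hm
      simp only [pvRed, ne_eq, not_true_eq_false, if_false, ite_false, reduceIte]
      rw [foldA_plain, prodDC_plain (some 0) (fun v => by simp [pvRed]) xs.length xs le_rfl,
        one_mul]
    · simp only [pvRed, hm, ne_eq, not_false_eq_true, if_true, ite_true, reduceIte]
      cases xs with
      | nil => simp [pvProdDC]
      | cons x t =>
        rw [foldA m hm (x :: t) 1 (by simp),
          prodDC_some m hm (x :: t).length (x :: t) le_rfl (by simp), one_mul]
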